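-- pv_equiv track=rewrite | github.com/wyk18703232953/myResearch | codeComplex/data copy/onlyCode/python/logn/python_logn_0236.py | check
-- ===== SOURCE A (Python) =====
-- def check(n,p):
--     k=str(n)
--     k=k[::-1]
--     s=0
--     for j in range(len(k)):
--         s+=(int(k[j])*(10**j-1))
--     if s>=p:
--         return 1
--     else:
--         return 0
-- ===== SOURCE B (Python) =====
-- def check(n, p):
--     d = sum(int(c) for c in str(n))
--     return 1 if n - d >= p else 0
-- ===== Notes on version B (the rewrite author's own statement) =====
-- stated objective: simpler
-- what changed: B replaces A's reverse-the-string loop that rebuilds place values as sum(digit*(10**j-1)) with the closed-form identity: that sum equals n minus the digit sum, so B computes one forward digit-sum pass and compares n - d >= p directly.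
import Mathlib
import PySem

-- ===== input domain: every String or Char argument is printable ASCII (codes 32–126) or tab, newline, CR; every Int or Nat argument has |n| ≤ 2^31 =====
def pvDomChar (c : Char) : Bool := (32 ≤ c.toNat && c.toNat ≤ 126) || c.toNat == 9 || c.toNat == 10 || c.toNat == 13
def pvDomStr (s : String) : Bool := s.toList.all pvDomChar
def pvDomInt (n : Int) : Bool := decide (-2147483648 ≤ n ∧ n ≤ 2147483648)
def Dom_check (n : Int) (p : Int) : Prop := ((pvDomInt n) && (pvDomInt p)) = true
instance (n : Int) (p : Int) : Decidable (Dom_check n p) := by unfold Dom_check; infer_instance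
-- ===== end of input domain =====

-- B simplifies A: the digit sum is taken in one forward pass and compared via n - d >= p
-- (equal to A's sum of digit*(10^j - 1) over the reversed string); return values only.

-- ===== PORT A =====
def check (n : Int) (p : Int) : Int :=
  let k := PySem.Int.toChars n
  let k := (PySem.List.slice? k none none (-1)).getD []
  let s := (PySem.List.pyRange 0 (k.length : Int) 1).foldl
      (fun s j => s + ((PySem.Int.ofChars? [PySem.List.pyGetD k j ' ']).getD 0)
                      * ((10 : Int) ^ j.toNat - 1)) 0
  if s ≥ p then 1 else 0

-- ===== PORT B =====
def check_alt (n : Int) (p : Int) : Int :=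
  let d := ((PySem.Int.toChars n).map (fun c => (PySem.Int.ofChars? [c]).getD 0)).sum
  if n - d ≥ p then 1 else 0

-- ===== PRECONDITION & SPEC =====
-- Pre_ excludes n < 0: there str(n) starts with '-' and both A and B raise ValueError on int('-').
def Pre_check (n : Int) (p : Int) : Prop := 0 ≤ n
instance (n : Int) (p : Int) : Decidable (Pre_check n p) := by unfold Pre_check; infer_instance
def pvWitness_check : Int × Int := (42, 7)
def Spec_check (n : Int) (p : Int) (out : Int) : Prop := out = check_alt n p
instance (n : Int) (p : Int) (out : Int) : Decidable (Spec_check n p out) := by unfold Spec_check; infer_instance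

-- ===== CLAIM (what is proved, stated in full; the proofs are below) =====
def Claim_equal_check : Prop := ∀ (n : Int) (p : Int), Dom_check n p → Pre_check n p → Spec_check n p (check n p)

-- ===== LEMMAS AND PROOFS =====

-- digit value of a single character, as both ports compute it
def pvDv (c : Char) : Int := (PySem.Int.ofChars? [c]).getD 0

lemma pvDv_digitChar (d : Nat) (hd : d < 10) : pvDv (Nat.digitChar d) = (d : Int) := by
  interval_cases d <;> decide

-- little-endian decimal value of a character list
def pvValLE : List Char → Int
  | [] => 0
  | c :: cs => pvDv c + 10 * pvValLE cs

lemma pvValLE_append (xs ys : List Char) :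
    pvValLE (xs ++ ys) = pvValLE xs + 10 ^ xs.length * pvValLE ys := by
  induction xs with
  | nil => simp [pvValLE]
  | cons c cs ih => simp [pvValLE, ih, pow_succ]; ring

-- the reversed decimal digits of m, read little-endian, are worth m
lemma pvValLE_toDigits (m : Nat) : pvValLE ((Nat.toDigits 10 m).reverse) = (m : Int) := by
  induction m using Nat.strong_induction_on with
  | _ m ih =>
    by_cases h : m < 10
    · rw [Nat.toDigits_of_lt_base h]
      simp [pvValLE, pvDv_digitChar m h]
    · rw [Nat.toDigits_of_base_le (by omega) (by omega)]
      rw [List.reverse_append]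
      simp only [List.reverse_singleton, List.singleton_append, pvValLE]
      rw [ih (m / 10) (by omega)]
      rw [pvDv_digitChar (m % 10) (Nat.mod_lt _ (by omega))]
      omega

-- A's indexed loop over any list k computes valLE k minus the digit sum of k
lemma pvLoopA (k : List Char) :
    (PySem.List.pyRange 0 (k.length : Int) 1).foldl
      (fun s j => s + pvDv (PySem.List.pyGetD k j ' ') * ((10 : Int) ^ j.toNat - 1)) 0
    = pvValLE k - (k.map pvDv).sum := by
  induction k using List.reverseRecOn with
  | nil => simp [PySem.List.pyRange_one_eq_nil, pvValLE]
  | append_singleton ks c ih =>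
    have hlen : ((ks ++ [c]).length : Int) = (ks.length : Int) + 1 := by simp
    rw [hlen, PySem.List.pyRange_one_succ_right (by positivity), List.foldl_append]
    have hcongr :
        (PySem.List.pyRange 0 (ks.length : Int) 1).foldl
          (fun s j => s + pvDv (PySem.List.pyGetD (ks ++ [c]) j ' ') * ((10 : Int) ^ j.toNat - 1)) 0
        = (PySem.List.pyRange 0 (ks.length : Int) 1).foldl
          (fun s j => s + pvDv (PySem.List.pyGetD ks j ' ') * ((10 : Int) ^ j.toNat - 1)) 0 := by
      apply PySem.List.foldl_congr_mem
      intro a j hj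
      have hmem := (PySem.List.mem_pyRange_one (a := 0) (b := (ks.length : Int)) (x := j)).1 hj
      obtain ⟨i, rfl⟩ : ∃ i : Nat, j = (i : Int) :=
        ⟨j.toNat, (Int.toNat_of_nonneg hmem.1).symm⟩
      have hi : i < ks.length := by exact_mod_cast hmem.2
      rw [PySem.List.pyGetD_natCast, PySem.List.pyGetD_natCast,
          List.getD_append _ _ _ _ hi]
    rw [hcongr, ih]
    simp only [List.foldl_cons, List.foldl_nil]
    have hlast : PySem.List.pyGetD (ks ++ [c]) ((ks.length : Nat) : Int) ' ' = c := by
      rw [PySem.List.pyGetD_natCast]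
      simp
    have htn : ((ks.length : Nat) : Int).toNat = ks.length := by simp
    rw [hlast, htn, pvValLE_append]
    simp [pvValLE]
    ring

-- ===== VERDICT (by name: the statement is the Claim_ definition above) =====
theorem check_spec : Claim_equal_check := by
  intro n p _ hpre
  have h0 : (0 : Int) ≤ n := hpre
  unfold Spec_check check check_alt
  have htc : PySem.Int.toChars n = Nat.toDigits 10 n.toNat := by
    unfold PySem.Int.toChars
    rw [if_neg (by omega)]
  simp only [PySem.List.slice?_none_none_neg_one, Option.getD_some, htc]
  have hA := pvLoopA ((Nat.toDigits 10 n.toNat).reverse)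
  have hV := pvValLE_toDigits n.toNat
  simp only [pvDv] at hA hV
  rw [hA, hV, Int.toNat_of_nonneg h0, List.map_reverse, List.sum_reverse]
  rfl
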